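-- pv_equiv track=rewrite | github.com/Alfred1109/xuanxuestructural | fix_tables_final.py | fix_markdown_tables
-- ===== SOURCE A (Python) =====
-- def fix_markdown_tables(content):
--     """彻底修复Markdown表格：移除表格内所有空行，确保表格行连续"""
--     lines = content.split('\n')
--     result = []
--     i = 0
--
--     while i < len(lines):
--         line = lines[i]
--         stripped = line.strip()
--
--         # 检查是否是表格行的开始
--         if stripped.startswith('|') and '|' in stripped:
--             # 找到表格的开始，确保前面有空行
--             if result and result[-1].strip() != '':
--                 result.append('')
--
--             # 收集所有连续的表格行（跳过中间的空行）
--             table_lines = []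
--             while i < len(lines):
--                 current = lines[i].strip()
--                 if current.startswith('|') and '|' in current:
--                     table_lines.append(lines[i])
--                     i += 1
--                 elif current == '' and i + 1 < len(lines):
--                     # 检查下一行是否还是表格行
--                     next_line = lines[i + 1].strip()
--                     if next_line.startswith('|') and '|' in next_line:
--                         # 跳过空行，继续收集表格
--                         i += 1
--                         continue
--                     else:
--                         # 表格结束
--                         break
--                 else:
--                     # 表格结束
--                     break
--
--             # 输出表格（所有行连续）
--             result.extend(table_lines)
--
--             # 表格后添加空行（如果下一行不是空行）
--             if i < len(lines) and lines[i].strip() != '':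
--                 result.append('')
--         else:
--             # 非表格行直接添加
--             result.append(line)
--             i += 1
--
--     return '\n'.join(result)
-- ===== SOURCE B (Python) =====
-- def fix_markdown_tables(content):
--     """One linear pass with an in_table flag instead of A's nested collect loop."""
--     lines = content.split('\n')
--     n = len(lines)
--     out = []
--     in_table = False
--     for i in range(n):
--         line = lines[i]
--         s = line.strip()
--         if s.startswith('|'):
--             if not in_table:
--                 if out and out[-1].strip() != '':
--                     out.append('')
--                 in_table = True
--             out.append(line)
--         elif in_table and s == '' and i + 1 < n and lines[i + 1].strip().startswith('|'):
--             pass  # blank line inside a table: dropped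
--         else:
--             if in_table:
--                 in_table = False
--                 if s != '':
--                     out.append('')
--             out.append(line)
--     return '\n'.join(out)
-- ===== Notes on version B (the rewrite author's own statement) =====
-- stated objective: simpler
-- what changed: Replaced A's nested while-loops (an outer scan plus an inner table-collecting loop with its own index, a separate table_lines buffer and post-loop blank insertion) by a single linear pass over the lines carrying one in_table boolean, emitting each line immediately.
import Mathlib
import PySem

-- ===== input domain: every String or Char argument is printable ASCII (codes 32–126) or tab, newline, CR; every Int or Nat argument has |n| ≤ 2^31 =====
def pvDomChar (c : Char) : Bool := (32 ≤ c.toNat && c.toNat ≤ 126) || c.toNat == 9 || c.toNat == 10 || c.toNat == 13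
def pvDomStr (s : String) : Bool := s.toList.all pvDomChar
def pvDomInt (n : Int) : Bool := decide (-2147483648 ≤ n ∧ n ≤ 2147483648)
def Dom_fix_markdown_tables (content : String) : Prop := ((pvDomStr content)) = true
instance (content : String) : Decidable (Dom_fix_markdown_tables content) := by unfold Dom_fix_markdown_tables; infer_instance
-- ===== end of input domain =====

-- B replaces A's nested collect-loop by one linear pass keeping an `in_table` flag (simpler decomposition, same O(n) cost).

-- ===== PORT A =====
-- inner while loop of A: collects the table lines and returns the index where it stopped
def pvCollectA (lines : List String) (i : Nat) : List String × Nat :=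
  if h : i < lines.length then
    let current := PySem.Str.strip lines[i]
    if PySem.Str.startswith current "|" && PySem.Str.isIn "|" current then
      let r := pvCollectA lines (i + 1)
      (lines[i] :: r.1, r.2)
    else if current == "" && decide (i + 1 < lines.length) then
      let next := PySem.Str.strip (lines.getD (i + 1) "")
      if PySem.Str.startswith next "|" && PySem.Str.isIn "|" next then
        pvCollectA lines (i + 1)
      else ([], i)
    else ([], i)
  else ([], i)
termination_by lines.length - i

theorem pvCollectA_le (lines : List String) : ∀ (k i : Nat), lines.length - i ≤ k →
    i ≤ (pvCollectA lines i).2 := by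
  intro k
  induction k with
  | zero =>
    intro i hk
    rw [pvCollectA]
    have : ¬ i < lines.length := by omega
    simp [this]
  | succ k ih =>
    intro i hk
    rw [pvCollectA]
    by_cases h : i < lines.length
    · simp only [dif_pos h]
      have h1 := ih (i + 1) (by omega)
      split
      · omega
      · split
        · split
          · omega
          · simp
        · simp
    · simp [h]

theorem pvCollectA_lt (lines : List String) (i : Nat) (h : i < lines.length)
    (hrow : (PySem.Str.startswith (PySem.Str.strip lines[i]) "|" &&
             PySem.Str.isIn "|" (PySem.Str.strip lines[i])) = true) :
    i < (pvCollectA lines i).2 := by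
  rw [pvCollectA]
  simp only [dif_pos h, hrow, if_pos]
  have := pvCollectA_le lines (lines.length - (i + 1)) (i + 1) (le_refl _)
  simpa using by omega

-- outer while loop of A
def pvLoopA (lines : List String) (i : Nat) (result : List String) : List String :=
  if h : i < lines.length then
    let line := lines[i]
    let stripped := PySem.Str.strip line
    if hrow : (PySem.Str.startswith stripped "|" && PySem.Str.isIn "|" stripped) = true then
      let result1 := if (!result.isEmpty) && (PySem.Str.strip (result.getLastD "") != "") then
        result ++ [""] else result
      let r := pvCollectA lines i
      let result2 := result1 ++ r.1
      let result3 := if r.2 < lines.length ∧ PySem.Str.strip (lines.getD r.2 "") ≠ "" then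
        result2 ++ [""] else result2
      pvLoopA lines r.2 result3
    else
      pvLoopA lines (i + 1) (result ++ [line])
  else result
termination_by lines.length - i
decreasing_by
  · have := pvCollectA_lt lines i h hrow; omega
  · omega

def fix_markdown_tables (content : String) : String :=
  PySem.Str.join "\n" (pvLoopA ((PySem.Str.split? content "\n").getD []) 0 [])

-- ===== PORT B =====
-- B's single for-loop over the line index, carrying the in_table flag
def pvLoopB (lines : List String) (i : Nat) (inTable : Bool) (out : List String) : List String :=
  if h : i < lines.length then
    let line := lines[i]
    let s := PySem.Str.strip line
    if PySem.Str.startswith s "|" then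
      let out1 := if (!inTable) && (!out.isEmpty) && (PySem.Str.strip (out.getLastD "") != "") then
        out ++ [""] else out
      pvLoopB lines (i + 1) true (out1 ++ [line])
    else if inTable && (s == "") && decide (i + 1 < lines.length) &&
        PySem.Str.startswith (PySem.Str.strip (lines.getD (i + 1) "")) "|" then
      pvLoopB lines (i + 1) true out
    else
      let out1 := if inTable && (s != "") then out ++ [""] else out
      pvLoopB lines (i + 1) false (out1 ++ [line])
  else out
termination_by lines.length - i

def fix_markdown_tables_alt (content : String) : String :=
  PySem.Str.join "\n" (pvLoopB ((PySem.Str.split? content "\n").getD []) 0 false [])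

-- ===== PRECONDITION & SPEC =====
def Spec_fix_markdown_tables (content : String) (out : String) : Prop := out = fix_markdown_tables_alt content
instance (content : String) (out : String) : Decidable (Spec_fix_markdown_tables content out) := by unfold Spec_fix_markdown_tables; infer_instance

-- ===== CLAIM (what is proved, stated in full; the proofs are below) =====
def Claim_equal_fix_markdown_tables : Prop := ∀ (content : String), Dom_fix_markdown_tables content → Spec_fix_markdown_tables content (fix_markdown_tables content)

-- ===== LEMMAS AND PROOFS =====

-- a stripped line starting with '|' certainly contains '|'
theorem pvRowC (s : List Char) (h : PySem.Chars.startswith s ['|'] = true) :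
    PySem.Chars.isIn ['|'] s = true :=
  (PySem.Chars.isIn_iff_infix _ _).2 ((PySem.Chars.startswith_iff _ _).1 h).isInfix

-- the blank after the table: what pvLoopA appends after the collected table lines
def pvMB (lines : List String) (j : Nat) : List String :=
  if j < lines.length ∧ PySem.Str.strip (lines.getD j "") ≠ "" then [""] else []

-- combined invariant: outside a table A's outer loop = B with inTable = false;
-- inside a table A's collect-then-continue = B with inTable = true
theorem pvAB (lines : List String) : ∀ (k : Nat), ∀ (j : Nat) (res : List String),
    lines.length - j ≤ k →
    (pvLoopA lines j res = pvLoopB lines j false res) ∧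
    (pvLoopA lines (pvCollectA lines j).2
        ((res ++ (pvCollectA lines j).1) ++ pvMB lines (pvCollectA lines j).2)
      = pvLoopB lines j true res) := by
  intro k
  induction k with
  | zero =>
    intro j res hk
    have hj : ¬ j < lines.length := by omega
    refine ⟨by rw [pvLoopA, pvLoopB]; simp only [dif_neg hj], ?_⟩
    rw [pvCollectA]; simp only [dif_neg hj]
    rw [pvLoopA, pvLoopB]
    simp [hj, pvMB]
  | succ k ih =>
    intro j res hk
    by_cases hj : j < lines.length
    case neg =>
      refine ⟨by rw [pvLoopA, pvLoopB]; simp only [dif_neg hj], ?_⟩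
      rw [pvCollectA]; simp only [dif_neg hj]
      rw [pvLoopA, pvLoopB]
      simp [hj, pvMB]
    case pos =>
    have hjj : lines[j]?.getD "" = lines[j] := by
      simp [List.getElem?_eq_getElem hj]
    have hsw : PySem.Chars.startswith [] ['|'] = false := by decide
    by_cases hrow : PySem.Chars.startswith (PySem.Chars.strip lines[j].toList) ['|'] = true
    · -- lines[j] is a table row
      have hin := pvRowC _ hrow
      have hcol : pvCollectA lines j =
          (lines[j] :: (pvCollectA lines (j+1)).1, (pvCollectA lines (j+1)).2) := by
        rw [pvCollectA]
        simp [hj, hrow, hin]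
      constructor
      · -- L1, row case
        have ih2 := (ih (j+1) ((if (!res.isEmpty) && (PySem.Str.strip (res.getLastD "") != "")
            then res ++ [""] else res) ++ [lines[j]]) (by omega)).2
        rw [pvLoopA, pvLoopB]
        simp only [dif_pos hj]
        by_cases hlen : (pvCollectA lines (j+1)).2 < lines.length
        · have hg : lines[(pvCollectA lines (j+1)).2]?.getD "" = lines[(pvCollectA lines (j+1)).2]'hlen := by
            simp [List.getElem?_eq_getElem hlen]
          by_cases hbs : PySem.Str.strip (lines[(pvCollectA lines (j+1)).2]'hlen) = ""
          · simpa [hrow, hin, hcol, pvMB, hlen, hg, hbs, List.append_assoc] using ih2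
          · simpa [hrow, hin, hcol, pvMB, hlen, hg, hbs, List.append_assoc] using ih2
        · simpa [hrow, hin, hcol, pvMB, hlen, List.append_assoc] using ih2
      · -- L2, row case
        have ih2 := (ih (j+1) (res ++ [lines[j]]) (by omega)).2
        rw [pvLoopB]
        simp only [dif_pos hj]
        by_cases hlen : (pvCollectA lines (j+1)).2 < lines.length
        · have hg : lines[(pvCollectA lines (j+1)).2]?.getD "" = lines[(pvCollectA lines (j+1)).2]'hlen := by
            simp [List.getElem?_eq_getElem hlen]
          by_cases hbs : PySem.Str.strip (lines[(pvCollectA lines (j+1)).2]'hlen) = ""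
          · simpa [hrow, hin, hcol, pvMB, hlen, hg, hbs, List.append_assoc] using ih2
          · simpa [hrow, hin, hcol, pvMB, hlen, hg, hbs, List.append_assoc] using ih2
        · simpa [hrow, hin, hcol, pvMB, hlen, List.append_assoc] using ih2
    · -- lines[j] is not a table row
      constructor
      · -- L1, non-row case
        have ih1 := (ih (j+1) (res ++ [lines[j]]) (by omega)).1
        rw [pvLoopA, pvLoopB]
        simp only [dif_pos hj]
        simpa [hrow] using ih1
      · -- L2: blank-skip or break
        by_cases hb : PySem.Str.strip lines[j] = ""
        · by_cases hlt : j + 1 < lines.length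
          · have hjj1 : lines[j+1]?.getD "" = lines[j+1] := by
              simp [List.getElem?_eq_getElem hlt]
            by_cases hnext : PySem.Chars.startswith
                (PySem.Chars.strip lines[j+1].toList) ['|'] = true
            · -- blank line inside the table, skipped by both
              have hinN := pvRowC _ hnext
              have hcol : pvCollectA lines j = pvCollectA lines (j+1) := by
                rw [pvCollectA]
                simp [hj, hb, hlt, hsw, hnext, hinN]
              have ih2 := (ih (j+1) res (by omega)).2
              rw [pvLoopB]
              simp only [dif_pos hj]
              simpa [hrow, hb, hlt, hsw, hjj1, hnext, hcol] using ih2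
            · -- blank line, next is not a row: the table ends at j
              have hcol : pvCollectA lines j = ([], j) := by
                rw [pvCollectA]
                simp [hj, hb, hlt, hsw, hnext]
              have ih1 := (ih (j+1) (res ++ [lines[j]]) (by omega)).1
              rw [hcol]
              simp only
              rw [pvLoopA, pvLoopB]
              simp only [dif_pos hj]
              simpa [hrow, hb, hlt, hsw, hjj1, hnext, pvMB, hjj] using ih1
          · -- blank last line: the table ends at j
            have hcol : pvCollectA lines j = ([], j) := by
              rw [pvCollectA]
              simp [hj, hb, hlt, hsw]
            have ih1 := (ih (j+1) (res ++ [lines[j]]) (by omega)).1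
            rw [hcol]
            simp only
            rw [pvLoopA, pvLoopB]
            simp only [dif_pos hj]
            simpa [hrow, hb, hlt, hsw, pvMB, hjj] using ih1
        · -- non-blank non-row terminator
          have hcol : pvCollectA lines j = ([], j) := by
            rw [pvCollectA]
            simp [hj, hrow, hb]
          have ih1 := (ih (j+1) ((res ++ [""]) ++ [lines[j]]) (by omega)).1
          rw [hcol]
          simp only
          rw [pvLoopA, pvLoopB]
          simp only [dif_pos hj]
          simpa [hrow, hb, hj, pvMB, hjj] using ih1

-- ===== VERDICT (by name: the statement is the Claim_ definition above) =====
theorem fix_markdown_tables_spec : Claim_equal_fix_markdown_tables := by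
  intro content _
  unfold Spec_fix_markdown_tables fix_markdown_tables fix_markdown_tables_alt
  congr 1
  exact (pvAB ((PySem.Str.split? content "\n").getD []) ((PySem.Str.split? content "\n").getD []).length 0 [] (by omega)).1
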